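-- pv_equiv track=rewrite | github.com/bubpen/codekata | 프로그래머스/0/181922. 수열과 구간 쿼리 4/수열과 구간 쿼리 4.py | solution
-- ===== SOURCE A (Python) =====
-- def solution(arr, queries):
--     answer = arr[:]
--     for i in queries:
--         for n in range(i[0],i[1]+1):
--             if n % i[2] == 0:
--                 answer[n] = answer[n] + 1
--             else:
--                 answer[n] = answer[n]
--     return answer
-- ===== SOURCE B (Python) =====
-- def solution(arr, queries):
--     # Step directly over the multiples of k in [s, e] instead of scanning
--     # every index and testing n % k == 0 (multiples of k = multiples of |k|).
--     answer = arr[:]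
--     for q in queries:
--         s, e, k = q[0], q[1], abs(q[2])
--         start = ((s + k - 1) // k) * k
--         for n in range(start, e + 1, k):
--             answer[n] += 1
--     return answer
-- ===== Notes on version B (the rewrite author's own statement) =====
-- stated objective: idiomatic
-- what changed: B steps directly over the multiples of |k| in [s,e] with a strided range starting at the first multiple ceil(s/k)*k, instead of A's scan of every index in [s,e] with an n%k==0 test and a dead else branch; per query this does O((e-s)/k) writes instead of O(e-s) iterations.
-- outside the precondition, e.g. on solution([1], [[2, 1]]): A returns [1], B raises IndexError; on solution([1, 2], [[3, 0, 0]]): A returns [1, 2], B raises ZeroDivisionError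
import Mathlib
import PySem

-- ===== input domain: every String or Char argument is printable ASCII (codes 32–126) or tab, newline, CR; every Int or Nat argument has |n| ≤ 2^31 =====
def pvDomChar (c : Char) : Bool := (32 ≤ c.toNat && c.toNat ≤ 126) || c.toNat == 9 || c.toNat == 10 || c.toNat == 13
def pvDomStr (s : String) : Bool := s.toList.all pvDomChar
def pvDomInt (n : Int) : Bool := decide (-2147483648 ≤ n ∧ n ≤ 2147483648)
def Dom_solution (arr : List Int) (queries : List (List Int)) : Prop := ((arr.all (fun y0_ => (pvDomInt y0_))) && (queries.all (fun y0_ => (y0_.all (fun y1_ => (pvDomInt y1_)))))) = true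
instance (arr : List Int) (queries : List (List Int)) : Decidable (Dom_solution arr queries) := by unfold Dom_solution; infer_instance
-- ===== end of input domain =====

-- B replaces A's scan of every index in [s,e] with a modulo test by a stride
-- that visits only the multiples of |k| in [s,e]; equivalence of return values.

-- ===== PORT A =====
-- inner body of A: 'for n in range(i[0], i[1]+1): if n % i[2] == 0: answer[n] += 1 else: answer[n] = answer[n]'
def solutionStep (answer : List Int) (i : List Int) : List Int :=
  (PySem.List.pyRange (PySem.List.pyGetD i 0 0) (PySem.List.pyGetD i 1 0 + 1) 1).foldl
    (fun answer n =>
      if PySem.Int.mod n (PySem.List.pyGetD i 2 0) == 0 then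
        PySem.List.pySetD answer n (PySem.List.pyGetD answer n 0 + 1)
      else
        PySem.List.pySetD answer n (PySem.List.pyGetD answer n 0))
    answer

def solution (arr : List Int) (queries : List (List Int)) : List Int :=
  queries.foldl solutionStep arr

-- ===== PORT B =====
-- inner body of B: s, e, k = q[0], q[1], abs(q[2]); start = ((s+k-1)//k)*k;
-- 'for n in range(start, e+1, k): answer[n] += 1'
def solutionAltStep (answer : List Int) (q : List Int) : List Int :=
  let s := PySem.List.pyGetD q 0 0
  let e := PySem.List.pyGetD q 1 0
  let k := |PySem.List.pyGetD q 2 0|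
  let start := PySem.Int.floordiv (s + k - 1) k * k
  (PySem.List.pyRange start (e + 1) k).foldl
    (fun answer n => PySem.List.pySetD answer n (PySem.List.pyGetD answer n 0 + 1))
    answer

def solution_alt (arr : List Int) (queries : List (List Int)) : List Int :=
  queries.foldl solutionAltStep arr

-- ===== PRECONDITION & SPEC =====
-- Pre_ excludes exactly the inputs where A or B raises: a query shorter than 3 or with
-- k = 0 (A raises unless its range is empty, B always raises there: IndexError /
-- ZeroDivisionError), and a nonempty range [s,e] reaching an index outside
-- [-len(arr), len(arr)) (IndexError in both).
def Pre_solution (arr : List Int) (queries : List (List Int)) : Prop :=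
  ∀ q ∈ queries, 3 ≤ q.length ∧ q.getD 2 0 ≠ 0 ∧
    (q.getD 0 0 ≤ q.getD 1 0 →
      -(arr.length : Int) ≤ q.getD 0 0 ∧ q.getD 1 0 < (arr.length : Int))
instance (arr : List Int) (queries : List (List Int)) : Decidable (Pre_solution arr queries) := by
  unfold Pre_solution; infer_instance

def pvWitness_solution : List Int × List (List Int) := ([1, 2, 3, 4], [[0, 3, 2], [-4, 2, 3]])

def Spec_solution (arr : List Int) (queries : List (List Int)) (out : List Int) : Prop := out = solution_alt arr queries
instance (arr : List Int) (queries : List (List Int)) (out : List Int) : Decidable (Spec_solution arr queries out) := by unfold Spec_solution; infer_instance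

-- ===== CLAIM (what is proved, stated in full; the proofs are below) =====
def Claim_equal_solution : Prop := ∀ (arr : List Int) (queries : List (List Int)), Dom_solution arr queries → Pre_solution arr queries → Spec_solution arr queries (solution arr queries)

-- ===== LEMMAS AND PROOFS =====

-- writing answer[n] back unchanged (A's else-branch) is the identity on an in-range index
lemma pySetD_pyGetD_self (xs : List Int) (i : Int) (h : PySem.Raise.InRange xs.length i) :
    PySem.List.pySetD xs i (PySem.List.pyGetD xs i 0) = xs := by
  obtain ⟨h1, h2⟩ := h
  by_cases hi : 0 ≤ i
  · rw [PySem.List.pySetD_of_nonneg, PySem.List.pyGetD_eq_getElem (h0 := hi)]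
    · exact List.set_getElem_self ..
    · simpa using h2
    · exact hi
  · have hk : xs.length - (-i).toNat < xs.length := by omega
    simp only [PySem.List.pySetD, PySem.List.pySet?, PySem.List.pyGetD, PySem.List.pyGet?,
      PySem.List.pyIdx?, if_neg hi, if_pos h1, Option.map_some, Option.getD_some]
    rw [Option.bind]
    simp only [List.getElem?_eq_getElem hk, Option.getD_some]
    simp [List.set_getElem_self]

lemma pairwise_pyRange_pos (a b k : Int) (hk : 0 < k) :
    (PySem.List.pyRange a b k).Pairwise (· < ·) := by
  rw [PySem.List.pyRange_of_pos a b hk]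
  refine List.pairwise_map.mpr (List.pairwise_lt_range.imp ?_)
  intro i j hij
  have h1 : (i : Int) < (j : Int) := by exact_mod_cast hij
  have h2 := mul_lt_mul_of_pos_left h1 hk
  linarith

-- the strided range of B contains exactly the multiples of k in [s, t)
lemma mem_strided (s t k x : Int) (hk : 0 < k) :
    x ∈ PySem.List.pyRange (PySem.Int.floordiv (s + k - 1) k * k) t k ↔
      (s ≤ x ∧ x < t) ∧ k ∣ x := by
  obtain ⟨hq1, hq2⟩ := (PySem.Int.floordiv_eq_iff_of_pos (a := s + k - 1) hk).mp rfl
  set q := PySem.Int.floordiv (s + k - 1) k with hqdef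
  rw [PySem.List.mem_pyRange_iff_of_pos hk]
  have hqk : k ∣ q * k := dvd_mul_left k q
  constructor
  · rintro ⟨hx1, hx2, hx3⟩
    have hdx : k ∣ x := by
      have : x = (x - q * k) + q * k := by ring
      rw [this]; exact dvd_add hx3 hqk
    have hsq : s ≤ q * k := by nlinarith
    exact ⟨⟨le_trans hsq hx1, hx2⟩, hdx⟩
  · rintro ⟨⟨hx1, hx2⟩, m, rfl⟩
    refine ⟨?_, hx2, ?_⟩
    · have hqm : q - 1 < m := by nlinarith
      have : q ≤ m := by omega
      calc q * k ≤ m * k := mul_le_mul_of_nonneg_right this (le_of_lt hk)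
        _ = k * m := mul_comm _ _
    · exact dvd_sub (Dvd.intro m rfl) hqk

-- B's strided range = A's unit range filtered by the divisibility test
lemma strided_eq_filter (s t k : Int) (hk : 0 < k) :
    PySem.List.pyRange (PySem.Int.floordiv (s + k - 1) k * k) t k
      = (PySem.List.pyRange s t 1).filter (fun n => PySem.Int.mod n k == 0) := by
  have hp1 : (PySem.List.pyRange (PySem.Int.floordiv (s + k - 1) k * k) t k).Pairwise (· < ·) :=
    pairwise_pyRange_pos _ _ _ hk
  have hp2 : ((PySem.List.pyRange s t 1).filter (fun n => PySem.Int.mod n k == 0)).Pairwise (· < ·) :=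
    (PySem.List.pairwise_lt_pyRange_one s t).filter _
  have hmem : ∀ x, x ∈ PySem.List.pyRange (PySem.Int.floordiv (s + k - 1) k * k) t k ↔
      x ∈ (PySem.List.pyRange s t 1).filter (fun n => PySem.Int.mod n k == 0) := by
    intro x
    rw [mem_strided s t k x hk, List.mem_filter, PySem.List.mem_pyRange_one]
    simp [PySem.Int.mod_eq_zero_iff_dvd]
  have hperm : ((PySem.List.pyRange s t 1).filter (fun n => PySem.Int.mod n k == 0)).Perm
      (PySem.List.pyRange (PySem.Int.floordiv (s + k - 1) k * k) t k) :=
    (List.perm_ext_iff_of_nodup (hp2.imp ne_of_lt) (hp1.imp ne_of_lt)).mpr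
      (fun a => ((hmem a).symm))
  calc PySem.List.pyRange (PySem.Int.floordiv (s + k - 1) k * k) t k
      = PySem.List.sorted ((PySem.List.pyRange s t 1).filter (fun n => PySem.Int.mod n k == 0)) (fun x => x) :=
        (PySem.List.sorted_eq_of_perm_of_pairwise_lt _ _ _ hperm.symm hp1).symm
    _ = (PySem.List.pyRange s t 1).filter (fun n => PySem.Int.mod n k == 0) :=
        PySem.List.sorted_eq_of_perm_of_pairwise_lt _ _ _ (List.Perm.refl _) hp2

-- scan-and-test fold = fold over the filtered list (the else-branch is the identity in range)
lemma foldl_if_filter (k : Int) : ∀ (xs ans : List Int),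
    (∀ n ∈ xs, PySem.Raise.InRange ans.length n) →
    xs.foldl (fun a n =>
        if PySem.Int.mod n k == 0 then
          PySem.List.pySetD a n (PySem.List.pyGetD a n 0 + 1)
        else
          PySem.List.pySetD a n (PySem.List.pyGetD a n 0)) ans
      = (xs.filter (fun n => PySem.Int.mod n k == 0)).foldl
          (fun a n => PySem.List.pySetD a n (PySem.List.pyGetD a n 0 + 1)) ans := by
  intro xs
  induction xs with
  | nil => intro ans _; rfl
  | cons n xs ih =>
    intro ans hx
    by_cases hc : (PySem.Int.mod n k == 0) = true
    · rw [List.foldl_cons, List.filter_cons_of_pos (p := fun n => PySem.Int.mod n k == 0) hc, List.foldl_cons, if_pos hc]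
      apply ih
      intro m hm
      simpa [PySem.List.length_pySetD] using hx m (List.mem_cons_of_mem _ hm)
    · rw [List.foldl_cons, List.filter_cons_of_neg (p := fun n => PySem.Int.mod n k == 0) hc, if_neg hc]
      rw [pySetD_pyGetD_self _ _ (hx n (List.mem_cons_self ..))]
      exact ih ans (fun m hm => hx m (List.mem_cons_of_mem _ hm))

lemma length_foldl_pres (body : List Int → Int → List Int)
    (h : ∀ a n, (body a n).length = a.length) :
    ∀ (xs : List Int) (ans : List Int), (xs.foldl body ans).length = ans.length := by
  intro xs
  induction xs with
  | nil => intro ans; rfl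
  | cons n xs ih => intro ans; rw [List.foldl_cons, ih, h]

lemma length_solutionAltStep (ans q : List Int) : (solutionAltStep ans q).length = ans.length := by
  unfold solutionAltStep
  exact length_foldl_pres _ (fun a n => PySem.List.length_pySetD ..) _ _

-- one query: A's scan equals B's stride
lemma step_eq (L : Nat) (q : List Int) (hk : q.getD 2 0 ≠ 0)
    (hr : q.getD 0 0 ≤ q.getD 1 0 → -(L : Int) ≤ q.getD 0 0 ∧ q.getD 1 0 < (L : Int))
    (ans : List Int) (hlen : ans.length = L) :
    solutionStep ans q = solutionAltStep ans q := by
  unfold solutionStep solutionAltStep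
  simp only [PySem.List.pyGetD_ofNat']
  have hK : 0 < |q.getD 2 0| := abs_pos.mpr hk
  have hmodeq : ∀ n : Int, (PySem.Int.mod n (q.getD 2 0) == 0) = (PySem.Int.mod n |q.getD 2 0| == 0) := by
    intro n
    by_cases h : q.getD 2 0 ∣ n <;> simp [PySem.Int.mod_eq_zero_iff_dvd, abs_dvd]
  have hx : ∀ n ∈ PySem.List.pyRange (q.getD 0 0) (q.getD 1 0 + 1) 1,
      PySem.Raise.InRange ans.length n := by
    intro n hn
    rw [PySem.List.mem_pyRange_one] at hn
    have := hr (by omega)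
    exact ⟨by rw [hlen]; omega, by rw [hlen]; omega⟩
  calc (PySem.List.pyRange (q.getD 0 0) (q.getD 1 0 + 1) 1).foldl
        (fun a n => if PySem.Int.mod n (q.getD 2 0) == 0 then
            PySem.List.pySetD a n (PySem.List.pyGetD a n 0 + 1)
          else PySem.List.pySetD a n (PySem.List.pyGetD a n 0)) ans
      = ((PySem.List.pyRange (q.getD 0 0) (q.getD 1 0 + 1) 1).filter
          (fun n => PySem.Int.mod n (q.getD 2 0) == 0)).foldl
          (fun a n => PySem.List.pySetD a n (PySem.List.pyGetD a n 0 + 1)) ans :=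
        foldl_if_filter _ _ _ hx
    _ = ((PySem.List.pyRange (q.getD 0 0) (q.getD 1 0 + 1) 1).filter
          (fun n => PySem.Int.mod n |q.getD 2 0| == 0)).foldl
          (fun a n => PySem.List.pySetD a n (PySem.List.pyGetD a n 0 + 1)) ans := by
        congr 1
        exact List.filter_congr (fun n _ => hmodeq n)
    _ = (PySem.List.pyRange
          (PySem.Int.floordiv (q.getD 0 0 + |q.getD 2 0| - 1) |q.getD 2 0| * |q.getD 2 0|)
          (q.getD 1 0 + 1) |q.getD 2 0|).foldl
          (fun a n => PySem.List.pySetD a n (PySem.List.pyGetD a n 0 + 1)) ans := by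
        rw [strided_eq_filter _ _ _ hK]

lemma main_aux (L : Nat) : ∀ (queries : List (List Int)) (ans : List Int), ans.length = L →
    (∀ q ∈ queries, q.getD 2 0 ≠ 0 ∧
      (q.getD 0 0 ≤ q.getD 1 0 → -(L : Int) ≤ q.getD 0 0 ∧ q.getD 1 0 < (L : Int))) →
    queries.foldl solutionStep ans = queries.foldl solutionAltStep ans := by
  intro queries
  induction queries with
  | nil => intro ans _ _; rfl
  | cons q qs ih =>
    intro ans hlen hq
    have h0 := hq q (List.mem_cons_self ..)
    rw [List.foldl_cons, List.foldl_cons, step_eq L q h0.1 h0.2 ans hlen]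
    exact ih _ (by rw [length_solutionAltStep, hlen]) (fun q hqm => hq q (List.mem_cons_of_mem _ hqm))

-- ===== VERDICT (by name: the statement is the Claim_ definition above) =====
theorem solution_spec : Claim_equal_solution := by
  intro arr queries _ hpre
  unfold Spec_solution solution solution_alt
  exact main_aux arr.length queries arr rfl (fun q hq => ⟨(hpre q hq).2.1, (hpre q hq).2.2⟩)
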